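-- pv_equiv track=rewrite | github.com/alexeybutyrev/leetcode-solutions | solutions/Prime In Diagonal/solution.py | diagonalPrime
-- ===== SOURCE A (Python) =====
-- from typing import List
--
-- def is_prime(num):
--     """
--     Check if a given number is a prime number.
--
--     Args:
--         num (int): The number to be checked.
--
--     Returns:
--         bool: True if the number is prime, False otherwise.
--     """
--     if num <= 1:
--         return False  # 0 and 1 are not prime numbers
--
--     if num <= 3:
--         return True  # 2 and 3 are prime numbers
--
--     if num % 2 == 0 or num % 3 == 0:
--         return False  # numbers divisible by 2 or 3 are not prime
--
--     i = 5
--     while i * i <= num: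
--         if num % i == 0 or num % (i + 2) == 0:
--             return False  # numbers divisible by i or i + 2 are not prime
--         i += 6
--
--     return True  # if the number passes all the above checks, it is a prime number
--
-- def diagonalPrime(nums: List[List[int]]) -> int:
--     ans = 0
--     N = len(nums)
--     for i in range(N):
--         if is_prime(nums[i][i]):
--             ans = max(ans, nums[i][i])
--         if is_prime(nums[i][N - i - 1]):
--             ans = max(ans, nums[i][N - i - 1])
--     return ans
-- ===== SOURCE B (Python) =====
-- from typing import List
--
-- def is_prime(num):
--     if num <= 1:
--         return False
--     if num <= 3:
--         return True
--     if num % 2 == 0 or num % 3 == 0: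
--         return False
--     i = 5
--     while i * i <= num:
--         if num % i == 0 or num % (i + 2) == 0:
--             return False
--         i += 6
--     return True
--
-- def diagonalPrime(nums: List[List[int]]) -> int:
--     N = len(nums)
--     diag = []
--     for i in range(N):
--         diag.append(nums[i][i])
--         diag.append(nums[i][N - i - 1])
--     diag.sort(reverse=True)
--     for v in diag:
--         if is_prime(v):
--             return v
--     return 0
-- ===== Notes on version B (the rewrite author's own statement) =====
-- stated objective: alternative
-- what changed: B collects all diagonal entries into one list, sorts it descending, and returns the first prime found (early exit), instead of A's running-max over primality checks of every entry.
import Mathlib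
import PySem

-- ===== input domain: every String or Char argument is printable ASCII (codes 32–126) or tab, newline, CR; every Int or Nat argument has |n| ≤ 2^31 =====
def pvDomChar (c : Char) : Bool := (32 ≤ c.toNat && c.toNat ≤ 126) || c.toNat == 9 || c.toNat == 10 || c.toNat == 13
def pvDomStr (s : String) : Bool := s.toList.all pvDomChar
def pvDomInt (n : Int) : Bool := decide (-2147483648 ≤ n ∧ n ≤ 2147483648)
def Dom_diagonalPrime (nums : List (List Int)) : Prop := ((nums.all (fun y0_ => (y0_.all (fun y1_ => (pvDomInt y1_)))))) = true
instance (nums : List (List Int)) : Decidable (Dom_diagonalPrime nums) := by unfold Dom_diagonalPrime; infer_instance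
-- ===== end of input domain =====

-- B sorts the diagonal entries in descending order and returns the first prime (early exit),
-- instead of A's running max over a primality check of every entry; same results, alternative algorithm.

-- ===== PORT A =====
-- the trial-division loop of is_prime: i = 5, 11, 17, … while i*i <= num
def isPrimeLoop (num i : Int) : Bool :=
  if h : i * i ≤ num then
    if PySem.Int.mod num i == 0 || PySem.Int.mod num (i + 2) == 0 then false
    else isPrimeLoop num (i + 6)
  else true
termination_by (num + 1 - i).toNat
decreasing_by
  have hle : i ≤ num := by nlinarith
  omega

def isPrime (num : Int) : Bool :=
  if num ≤ 1 then false
  else if num ≤ 3 then true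
  else if PySem.Int.mod num 2 == 0 || PySem.Int.mod num 3 == 0 then false
  else isPrimeLoop num 5

def diagonalPrime (nums : List (List Int)) : Int :=
  let N : Nat := nums.length
  (PySem.List.pyRange 0 (N : Int) 1).foldl (fun ans i =>
    let row := PySem.List.pyGetD nums i []
    let a := PySem.List.pyGetD row i 0
    let ans := if isPrime a then max ans a else ans
    let b := PySem.List.pyGetD row ((N : Int) - i - 1) 0
    if isPrime b then max ans b else ans) 0

-- ===== PORT B =====
-- return the first prime of the (descending-sorted) list, else 0
def firstPrime : List Int → Int
  | [] => 0
  | v :: rest => if isPrime v then v else firstPrime rest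

def diagonalPrime_alt (nums : List (List Int)) : Int :=
  let N : Nat := nums.length
  let diag := (PySem.List.pyRange 0 (N : Int) 1).foldl (fun acc i =>
    let row := PySem.List.pyGetD nums i []
    acc ++ [PySem.List.pyGetD row i 0, PySem.List.pyGetD row ((N : Int) - i - 1) 0]) []
  firstPrime (PySem.List.sorted diag (fun x => x) true)

-- ===== PRECONDITION & SPEC =====
-- Pre_: every row i is long enough for both diagonal accesses nums[i][i] and nums[i][N-i-1];
-- outside it the Python A (and B) raise IndexError.
def Pre_diagonalPrime (nums : List (List Int)) : Prop :=
  ∀ i, i < nums.length →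
    i < (nums.getD i []).length ∧ nums.length - 1 - i < (nums.getD i []).length

instance (nums : List (List Int)) : Decidable (Pre_diagonalPrime nums) := by
  unfold Pre_diagonalPrime; infer_instance

def pvWitness_diagonalPrime : List (List Int) := [[2, 4], [6, 7]]

def Spec_diagonalPrime (nums : List (List Int)) (out : Int) : Prop := out = diagonalPrime_alt nums
instance (nums : List (List Int)) (out : Int) : Decidable (Spec_diagonalPrime nums out) := by unfold Spec_diagonalPrime; infer_instance

-- ===== CLAIM (what is proved, stated in full; the proofs are below) =====
def Claim_equal_diagonalPrime : Prop := ∀ (nums : List (List Int)), Dom_diagonalPrime nums → Pre_diagonalPrime nums → Spec_diagonalPrime nums (diagonalPrime nums)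

-- ===== LEMMAS AND PROOFS =====

-- the accumulator step of A's loop
def pstep (s v : Int) : Int := if isPrime v then max s v else s

theorem isPrime_two_le (v : Int) (h : isPrime v = true) : 2 ≤ v := by
  unfold isPrime at h
  split_ifs at h <;> omega

-- A's two sequential updates per index are a fold of pstep over the flattened pair list
theorem fold_pairs (g1 g2 : Int → Int) (r : List Int) (s : Int) :
    r.foldl (fun s i => pstep (pstep s (g1 i)) (g2 i)) s
      = (r.flatMap (fun i => [g1 i, g2 i])).foldl pstep s := by
  induction r generalizing s with
  | nil => rfl
  | cons x t ih => simp [List.foldl, ih]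

-- B's list-building loop produces the same flattened pair list
theorem build_pairs (g1 g2 : Int → Int) (r : List Int) (acc : List Int) :
    r.foldl (fun acc i => acc ++ [g1 i, g2 i]) acc
      = acc ++ r.flatMap (fun i => [g1 i, g2 i]) := by
  induction r generalizing acc with
  | nil => simp
  | cons x t ih => simp [List.foldl, ih]

theorem pstep_rcomm (z x y : Int) : pstep (pstep z x) y = pstep (pstep z y) x := by
  unfold pstep
  split_ifs <;> simp [max_comm, max_left_comm]

theorem foldl_pstep_of_le (t : List Int) (s : Int) (h : ∀ y ∈ t, y ≤ s) :
    t.foldl pstep s = s := by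
  induction t with
  | nil => rfl
  | cons x r ih =>
    have hx : x ≤ s := h x (by simp)
    have hs : pstep s x = s := by
      unfold pstep; split_ifs <;> simp [max_eq_left hx]
    rw [List.foldl_cons, hs]
    exact ih (fun y hy => h y (by simp [hy]))

-- on a descending list, the running max over primes is the first prime
theorem foldl_pstep_sorted (S : List Int) (hS : S.Pairwise (fun a b => b ≤ a)) :
    S.foldl pstep 0 = firstPrime S := by
  induction S with
  | nil => rfl
  | cons v t ih =>
    have h1 : ∀ y ∈ t, y ≤ v := fun y hy => (List.pairwise_cons.mp hS).1 y hy
    have h2 := (List.pairwise_cons.mp hS).2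
    by_cases hp : isPrime v = true
    · have h2v : 2 ≤ v := isPrime_two_le v hp
      have : pstep 0 v = v := by unfold pstep; simp [hp]; omega
      rw [List.foldl_cons, this, foldl_pstep_of_le t v h1]
      simp [firstPrime, hp]
    · have : pstep 0 v = 0 := by unfold pstep; simp [hp]
      rw [List.foldl_cons, this, ih h2]
      simp [firstPrime, hp]

-- running max over a list = first prime of its descending sort
theorem foldl_pstep_eq_firstPrime_sorted (L : List Int) :
    L.foldl pstep 0 = firstPrime (PySem.List.sorted L (fun x => x) true) := by
  have hperm : (PySem.List.sorted L (fun x => x) true).Perm L :=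
    PySem.List.sorted_perm L (fun x => x) true
  have hpair : (PySem.List.sorted L (fun x => x) true).Pairwise (fun a b => b ≤ a) :=
    PySem.List.sorted_pairwise_rev L (fun x => x)
  rw [(hperm.symm).foldl_eq' (fun x _ y _ z => pstep_rcomm z x y) 0]
  exact foldl_pstep_sorted _ hpair

theorem combined (g1 g2 : Int → Int) (r : List Int) :
    r.foldl (fun ans i => pstep (pstep ans (g1 i)) (g2 i)) 0
      = firstPrime (PySem.List.sorted (r.foldl (fun acc i => acc ++ [g1 i, g2 i]) []) (fun x => x) true) := by
  rw [fold_pairs, build_pairs, List.nil_append, foldl_pstep_eq_firstPrime_sorted]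

-- ===== VERDICT (by name: the statement is the Claim_ definition above) =====
theorem diagonalPrime_spec : Claim_equal_diagonalPrime := by
  intro nums _ _
  show diagonalPrime nums = diagonalPrime_alt nums
  unfold diagonalPrime diagonalPrime_alt
  exact combined
    (fun i => PySem.List.pyGetD (PySem.List.pyGetD nums i []) i 0)
    (fun i => PySem.List.pyGetD (PySem.List.pyGetD nums i []) ((nums.length : Int) - i - 1) 0)
    (PySem.List.pyRange 0 (nums.length : Int) 1)
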